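-- pv_equiv track=rewrite | github.com/geavenx/Portfolio-Study | python/HackerRank/equalLevels.py | updateTimes
-- ===== SOURCE A (Python) =====
-- def updateTimes(signalOne, signalTwo):
--     maxEqualSignal = 0
--     maxEqualSignalUpdates = 0
--
--     counter = 0
--     x = len(signalOne)
--     y = len(signalTwo)
--
--     if x > y:
--         for i in signalTwo:
--             if i == signalOne[counter]:
--                 if i > maxEqualSignal:
--                     maxEqualSignalUpdates += 1
--                     maxEqualSignal = i
--             counter += 1
--     elif y >= x:
--         for i in signalOne:
--             if i == signalTwo[counter]:
--                 if i > maxEqualSignal: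
--                     maxEqualSignalUpdates += 1
--                     maxEqualSignal = i
--             counter += 1
--
--
--     return maxEqualSignalUpdates
-- ===== SOURCE B (Python) =====
-- def updateTimes(signalOne, signalTwo):
--     matched = [a for a, b in zip(signalOne, signalTwo) if a == b]
--     return sum(1 for i, v in enumerate(matched)
--                if v > 0 and all(w < v for w in matched[:i]))
-- ===== Notes on version B (the rewrite author's own statement) =====
-- stated objective: alternative
-- what changed: A's stateful single pass (running maximum + update counter over the shorter signal, chosen by two mirrored length branches) is replaced by a stateless characterization: build the matched values once with zip, then count the positions that hold a positive strict left-to-right maximum, testing each value against its whole prefix.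
import Mathlib
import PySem

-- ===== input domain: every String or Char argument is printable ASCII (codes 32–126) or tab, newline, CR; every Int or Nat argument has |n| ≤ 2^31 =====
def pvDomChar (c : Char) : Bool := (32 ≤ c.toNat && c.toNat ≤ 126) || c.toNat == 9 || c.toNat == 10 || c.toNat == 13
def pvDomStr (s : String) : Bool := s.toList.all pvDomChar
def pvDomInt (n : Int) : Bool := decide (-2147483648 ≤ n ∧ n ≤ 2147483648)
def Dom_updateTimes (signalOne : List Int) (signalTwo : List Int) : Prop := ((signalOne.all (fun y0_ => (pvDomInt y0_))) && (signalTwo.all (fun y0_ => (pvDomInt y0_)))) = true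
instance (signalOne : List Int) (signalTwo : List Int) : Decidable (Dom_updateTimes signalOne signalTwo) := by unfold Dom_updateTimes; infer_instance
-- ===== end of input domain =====

-- B replaces A's stateful running-max pass by a stateless count of positive strict prefix maxima over the zip-matched values (objective: alternative; quadratic, not faster).


-- ===== PORT A =====
-- A's for-loop: iterate over `short`, index into `long` with the running `counter`.
-- `none` (Python IndexError) is unreachable here because A only runs the loop over the shorter list.
def updateTimesLoop (long : List Int) (short : List Int) (counter : Int) (mx : Int) (upd : Int) : Int :=
  match short with
  | [] => upd
  | i :: rest =>
    match PySem.List.pyGet? long counter with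
    | none => upd
    | some v =>
      if i = v then
        if i > mx then updateTimesLoop long rest (counter + 1) i (upd + 1)
        else updateTimesLoop long rest (counter + 1) mx upd
      else updateTimesLoop long rest (counter + 1) mx upd

def updateTimes (signalOne : List Int) (signalTwo : List Int) : Int :=
  if PySem.List.len signalOne > PySem.List.len signalTwo then
    updateTimesLoop signalOne signalTwo 0 0 0
  else
    updateTimesLoop signalTwo signalOne 0 0 0

-- ===== PORT B =====
-- matched = [a for a, b in zip(signalOne, signalTwo) if a == b]
def updateTimesMatched (signalOne : List Int) (signalTwo : List Int) : List Int :=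
  ((signalOne.zip signalTwo).filter (fun p => p.1 == p.2)).map Prod.fst

-- sum(1 for i, v in enumerate(matched) if v > 0 and all(w < v for w in matched[:i]))
def updateTimes_alt (signalOne : List Int) (signalTwo : List Int) : Int :=
  let m := updateTimesMatched signalOne signalTwo
  (PySem.List.enumerate m 0).foldl
    (fun (acc : Int) p =>
      if p.2 > 0 ∧ (PySem.List.slice m none (some p.1)).all (fun w => decide (w < p.2)) = true
      then acc + 1 else acc) 0

-- ===== PRECONDITION & SPEC =====
def Spec_updateTimes (signalOne : List Int) (signalTwo : List Int) (out : Int) : Prop := out = updateTimes_alt signalOne signalTwo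
instance (signalOne : List Int) (signalTwo : List Int) (out : Int) : Decidable (Spec_updateTimes signalOne signalTwo out) := by unfold Spec_updateTimes; infer_instance

-- ===== CLAIM (what is proved, stated in full; the proofs are below) =====
def Claim_equal_updateTimes : Prop := ∀ (signalOne : List Int) (signalTwo : List Int), Dom_updateTimes signalOne signalTwo → Spec_updateTimes signalOne signalTwo (updateTimes signalOne signalTwo)

-- ===== LEMMAS AND PROOFS =====

-- Number of strict left-to-right maxima of m above the threshold t.
def countFrom (t : Int) : List Int → Int
  | [] => 0
  | v :: r => if v > t then 1 + countFrom v r else countFrom t r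

-- A's loop, started at counter k, counts the strict maxima (above mx) of the matched values.
theorem updateTimesLoop_eq (short : List Int) : ∀ (long : List Int) (k : Nat) (mx upd : Int),
    k + short.length ≤ long.length →
    updateTimesLoop long short (k : Int) mx upd =
      upd + countFrom mx (((short.zip (long.drop k)).filter (fun p => p.1 == p.2)).map Prod.fst) := by
  induction short with
  | nil => intro long k mx upd _; simp [updateTimesLoop, countFrom]
  | cons i rest ih =>
    intro long k mx upd h
    have hk : k < long.length := by simp at h; omega
    have hget : PySem.List.pyGet? long (k : Int) = some long[k] := by
      simp [PySem.List.pyGet?_natCast, List.getElem?_eq_getElem hk]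
    have hdrop : long.drop k = long[k] :: long.drop (k + 1) :=
      List.drop_eq_getElem_cons hk
    have hstep : ((k : Int) + 1) = ((k + 1 : Nat) : Int) := by push_cast; ring
    have hrec : k + 1 + rest.length ≤ long.length := by simp at h; omega
    rw [updateTimesLoop, hget, hdrop, List.zip_cons_cons]
    dsimp only
    by_cases he : i = long[k]
    · have hbe : ((i, long[k]).1 == (i, long[k]).2) = true := by simp [he]
      rw [if_pos he]
      simp only [List.filter_cons, hbe]
      rw [if_pos trivial, List.map_cons]
      by_cases hm : i > mx
      · rw [if_pos hm, hstep, ih long (k + 1) i (upd + 1) hrec, countFrom, if_pos hm]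
        ring
      · rw [if_neg hm, hstep, ih long (k + 1) mx upd hrec, countFrom, if_neg hm]
    · have hbe : ((i, long[k]).1 == (i, long[k]).2) = false := by simp [he]
      rw [if_neg he]
      simp only [List.filter_cons, hbe]
      rw [if_neg (by simp), hstep, ih long (k + 1) mx upd hrec]

-- On equal pairs the order of the zip does not matter.
theorem updateTimesMatched_comm (s1 s2 : List Int) :
    updateTimesMatched s1 s2 = updateTimesMatched s2 s1 := by
  unfold updateTimesMatched
  rw [← List.zip_swap s1 s2, List.filter_map, List.map_map]
  have h1 : (fun p : Int × Int => p.1 == p.2) ∘ Prod.swap = fun p : Int × Int => p.2 == p.1 := by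
    funext p; simp [Prod.swap]
  rw [h1]
  have h2 : (s1.zip s2).filter (fun p : Int × Int => p.2 == p.1)
      = (s1.zip s2).filter (fun p : Int × Int => p.1 == p.2) := by
    apply List.filter_congr; intro p _; simp [eq_comm]
  rw [h2]
  apply List.map_congr_left
  intro p hp
  have := List.of_mem_filter hp
  simp at this
  simp [Prod.swap, this]

-- foldl max characterization.
theorem foldl_max_lt_iff (pre : List Int) : ∀ (a v : Int),
    pre.foldl max a < v ↔ (a < v ∧ ∀ w ∈ pre, w < v) := by
  induction pre with
  | nil => intro a v; simp
  | cons x r ih =>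
    intro a v
    rw [List.foldl_cons, ih]
    constructor
    · rintro ⟨h1, h2⟩
      exact ⟨lt_of_le_of_lt (le_max_left a x) h1,
        by intro w hw; cases hw with
           | head => exact lt_of_le_of_lt (le_max_right a x) h1
           | tail _ h => exact h2 w h⟩
    · rintro ⟨h1, h2⟩
      exact ⟨max_lt h1 (h2 x (List.mem_cons_self)), fun w hw => h2 w (List.mem_cons_of_mem _ hw)⟩

-- B's enumerate/prefix-scan count over the suffix r of m = pre ++ r equals countFrom of the running max of (0 :: pre).
theorem enumFold_eq_countFrom (r : List Int) : ∀ (pre : List Int) (acc : Int),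
    (PySem.List.enumerate r (pre.length : Int)).foldl
      (fun (acc : Int) p =>
        if p.2 > 0 ∧ (PySem.List.slice (pre ++ r) none (some p.1)).all (fun w => decide (w < p.2)) = true
        then acc + 1 else acc) acc
    = acc + countFrom (pre.foldl max 0) r := by
  induction r with
  | nil => intro pre acc; simp [PySem.List.enumerate_nil, countFrom]
  | cons v rest ih =>
    intro pre acc
    rw [PySem.List.enumerate_cons, List.foldl_cons]
    have hslice : PySem.List.slice (pre ++ v :: rest) none (some (pre.length : Int)) = pre := by
      rw [PySem.List.slice_to_natCast]; simp
    have hcond : (v > 0 ∧ (PySem.List.slice (pre ++ v :: rest) none (some (pre.length : Int))).all (fun w => decide (w < v)) = true)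
        ↔ pre.foldl max 0 < v := by
      rw [hslice, foldl_max_lt_iff, List.all_eq_true]
      constructor
      · rintro ⟨h1, h2⟩; exact ⟨h1, fun w hw => by simpa using h2 w hw⟩
      · rintro ⟨h1, h2⟩; exact ⟨h1, fun w hw => by simpa using h2 w hw⟩
    have hpre : ((pre ++ [v]).length : Int) = (pre.length : Int) + 1 := by
      simp
    have happ : pre ++ v :: rest = (pre ++ [v]) ++ rest := by simp
    have hmax : (pre ++ [v]).foldl max 0 = max (pre.foldl max 0) v := by
      simp [List.foldl_append]
    dsimp only
    by_cases hc : pre.foldl max 0 < v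
    · rw [if_pos (hcond.mpr hc)]
      have := ih (pre ++ [v]) (acc + 1)
      rw [hpre, ← happ] at this
      rw [this, hmax, countFrom, if_pos hc, max_eq_right (le_of_lt hc)]
      ring
    · rw [if_neg (fun h => hc (hcond.mp h))]
      have := ih (pre ++ [v]) acc
      rw [hpre, ← happ] at this
      rw [this, hmax, countFrom, if_neg hc, max_eq_left (le_of_not_gt hc)]

theorem alt_eq_countFrom (s1 s2 : List Int) :
    updateTimes_alt s1 s2 = countFrom 0 (updateTimesMatched s1 s2) := by
  unfold updateTimes_alt
  have := enumFold_eq_countFrom (updateTimesMatched s1 s2) [] 0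
  simpa using this

-- ===== VERDICT (by name: the statement is the Claim_ definition above) =====
theorem updateTimes_spec : Claim_equal_updateTimes := by
  intro s1 s2 _
  unfold Spec_updateTimes updateTimes
  rw [alt_eq_countFrom]
  by_cases h : PySem.List.len s1 > PySem.List.len s2
  · rw [if_pos h]
    have hlen : (0 : Nat) + s2.length ≤ s1.length := by
      simp [PySem.List.len] at h; omega
    have := updateTimesLoop_eq s2 s1 0 0 0 hlen
    simp only [Nat.cast_zero, List.drop_zero] at this
    rw [this, ← updateTimesMatched, updateTimesMatched_comm]
    ring
  · rw [if_neg h]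
    have hlen : (0 : Nat) + s1.length ≤ s2.length := by
      simp [PySem.List.len] at h; omega
    have := updateTimesLoop_eq s1 s2 0 0 0 hlen
    simp only [Nat.cast_zero, List.drop_zero] at this
    rw [this, ← updateTimesMatched]
    ring
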